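-- pv_equiv track=rewrite | github.com/CPL-SeongminCheon/Trypsin_LysC_InSilico_Digestion | Trypsin-lysC_clevage_predict.py | tryptic_cut
-- ===== SOURCE A (Python) =====
-- from itertools import combinations
--
-- def tryptic_cut(sequence,allow_miss_clevage,min_length):
--
-- 	sequence = sequence.rstrip("*").upper()
-- 	cut_locus=[0]
--
-- 	for i in range(0, len(sequence)-1):    #Trypsin/lys-C clevage locus identify
-- 		if sequence[i] == "K" or sequence[i] == "R":
-- 			cut_locus.append(i+1)
-- 	if cut_locus[-1] != len(sequence):      #if  not K in R in end of peptide, append end point in cut_locus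
-- 		cut_locus.append(len(sequence))
--
-- 	all_predict_peptide = []     # All predicted clevate peptide in list
-- 	allow_tryptic_peptide = []   # only allow miss clevage and min_length peptide in list
--
-- 	if len(cut_locus) > 2:     #Trypsin clevage site in peptide sequence
--
-- 		for combi in combinations(cut_locus , 2): 	 #return combination by tuple in list
-- 			all_predict_peptide.append(sequence[combi[0]:combi[1]])
--
-- 		for line in all_predict_peptide:   # Check and Filtering by allow miss clevage sites
-- 			if line[-1] =="K" or line[-1] =="R":
-- 				line_checked = line[:-1]
-- 			else:
-- 				line_checked = line
-- 			if (line_checked.count("R") + line_checked.count("K")) <= allow_miss_clevage: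
-- 				if len(line) >= min_length:
-- 					allow_tryptic_peptide.append(line)
-- 				else:
-- 					continue
--
-- 	else: 		#No trypsin clevage site in peptide sequence
-- 		if len(sequence) >= min_length:
-- 			allow_tryptic_peptide.append(sequence)
--
-- 	return allow_tryptic_peptide
-- ===== SOURCE B (Python) =====
-- def tryptic_cut(sequence, allow_miss_clevage, min_length):
--     seq = sequence.rstrip("*").upper()
--     n = len(seq)
--     # cleavage boundaries: start, every position after an internal K/R, end
--     cuts = [0] + [i + 1 for i in range(n - 1) if seq[i] in "KR"] + [n]
--     peptides = []
--     for idx, start in enumerate(cuts):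
--         # a peptide with at most `allow_miss_clevage` internal cleavage sites ends at
--         # one of the next allow_miss_clevage+1 boundaries: no counting inside strings
--         for end in cuts[idx + 1 : idx + 2 + allow_miss_clevage]:
--             if end - start >= min_length:
--                 peptides.append(seq[start:end])
--     return peptides
-- ===== Notes on version B (the rewrite author's own statement) =====
-- stated objective: faster
-- what changed: Instead of materialising every pair of cleavage boundaries and counting K/R letters inside each candidate substring, B slides a window over the boundary list: the number of missed cleavages of a peptide spanning boundaries idx..j is j-idx-1, so only the next allow_miss_clevage+1 boundaries are paired with each start and no substring counting happens at all.
-- outside the precondition, e.g. on tryptic_cut('PEPTIDE', -1, 1): A returns ['PEPTIDE'], B returns []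
import Mathlib
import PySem

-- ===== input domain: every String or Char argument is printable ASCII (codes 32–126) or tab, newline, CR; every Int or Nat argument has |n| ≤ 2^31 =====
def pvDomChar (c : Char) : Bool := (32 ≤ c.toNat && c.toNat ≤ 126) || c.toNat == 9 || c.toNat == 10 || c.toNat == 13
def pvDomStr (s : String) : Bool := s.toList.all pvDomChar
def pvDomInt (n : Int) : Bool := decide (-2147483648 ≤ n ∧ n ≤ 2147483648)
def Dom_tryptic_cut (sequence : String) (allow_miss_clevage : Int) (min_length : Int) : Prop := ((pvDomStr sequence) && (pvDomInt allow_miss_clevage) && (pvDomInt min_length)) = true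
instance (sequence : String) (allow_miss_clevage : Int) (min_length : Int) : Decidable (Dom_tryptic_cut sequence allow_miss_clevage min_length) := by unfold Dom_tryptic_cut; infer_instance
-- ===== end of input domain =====

-- B replaces A's "all boundary pairs + count K/R letters inside every candidate substring" by a
-- sliding window over the cleavage-boundary list (missed cleavages of a peptide = number of
-- boundaries strictly inside it), pairing each start with at most allow_miss_clevage+1 ends.

-- exact port of Python str.rstrip("*"): removes every trailing '*' character
def pvRstripStar (cs : List Char) : List Char := (cs.reverse.dropWhile (· == '*')).reverse

-- ===== PORT A =====
def tryptic_cut (sequence : String) (allow_miss_clevage : Int) (min_length : Int) : List String :=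
  let seq : List Char := PySem.Chars.upper (pvRstripStar sequence.toList)
  let n : Int := (seq.length : Int)
  let cut_locus : List Int :=
    (PySem.List.pyRange 0 (n - 1) 1).foldl
      (fun acc i =>
        if PySem.List.pyGetD seq i ' ' == 'K' || PySem.List.pyGetD seq i ' ' == 'R'
        then acc ++ [i + 1] else acc) [0]
  let cut_locus : List Int :=
    if PySem.List.pyGetD cut_locus (-1) 0 ≠ n then cut_locus ++ [n] else cut_locus
  if cut_locus.length > 2 then
    let all_predict_peptide : List (List Char) :=
      (PySem.List.combinations cut_locus 2).foldl
        (fun acc combi =>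
          acc ++ [PySem.List.slice seq (some (PySem.List.pyGetD combi 0 0))
                    (some (PySem.List.pyGetD combi 1 0))]) []
    all_predict_peptide.foldl
      (fun acc line =>
        let line_checked :=
          if PySem.List.pyGetD line (-1) ' ' == 'K' || PySem.List.pyGetD line (-1) ' ' == 'R'
          then PySem.List.slice line none (some (-1)) else line
        if ((PySem.Chars.count line_checked ['R'] : Int) + (PySem.Chars.count line_checked ['K'] : Int))
             ≤ allow_miss_clevage
        then if min_length ≤ (line.length : Int) then acc ++ [String.ofList line] else acc
        else acc) []
  else
    if min_length ≤ n then [String.ofList seq] else []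

-- ===== PORT B =====
def tryptic_cut_alt (sequence : String) (allow_miss_clevage : Int) (min_length : Int) : List String :=
  let seq : List Char := PySem.Chars.upper (pvRstripStar sequence.toList)
  let n : Int := (seq.length : Int)
  let cuts : List Int :=
    0 :: ((PySem.List.pyRange 0 (n - 1) 1).filter
            (fun i => PySem.Chars.isIn [PySem.List.pyGetD seq i ' '] ['K', 'R'])).map (· + 1)
      ++ [n]
  (PySem.List.enumerate cuts 0).foldl
    (fun acc p =>
      (PySem.List.slice cuts (some (p.1 + 1)) (some (p.1 + 2 + allow_miss_clevage))).foldl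
        (fun acc2 e =>
          if min_length ≤ e - p.2
          then acc2 ++ [String.ofList (PySem.List.slice seq (some p.2) (some e))]
          else acc2) acc) []

-- ===== PRECONDITION & SPEC =====
-- Pre_ excludes a negative allowed-missed-cleavage count, which lies outside the function's
-- natural domain: there A's two branches are inconsistent (with no cleavage site A still returns
-- the whole sequence, ignoring the allowance) and B's window is empty or wraps.
def Pre_tryptic_cut (sequence : String) (allow_miss_clevage : Int) (min_length : Int) : Prop :=
  0 ≤ allow_miss_clevage
instance (sequence : String) (allow_miss_clevage : Int) (min_length : Int) : Decidable (Pre_tryptic_cut sequence allow_miss_clevage min_length) := by unfold Pre_tryptic_cut; infer_instance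

def pvWitness_tryptic_cut : String × Int × Int := ("MKRPEPKTIDE*", 1, 2)

def Spec_tryptic_cut (sequence : String) (allow_miss_clevage : Int) (min_length : Int) (out : List String) : Prop := out = tryptic_cut_alt sequence allow_miss_clevage min_length
instance (sequence : String) (allow_miss_clevage : Int) (min_length : Int) (out : List String) : Decidable (Spec_tryptic_cut sequence allow_miss_clevage min_length out) := by unfold Spec_tryptic_cut; infer_instance

-- ===== CLAIM (what is proved, stated in full; the proofs are below) =====
def Claim_equal_tryptic_cut : Prop := ∀ (sequence : String) (allow_miss_clevage : Int) (min_length : Int), Dom_tryptic_cut sequence allow_miss_clevage min_length → Pre_tryptic_cut sequence allow_miss_clevage min_length → Spec_tryptic_cut sequence allow_miss_clevage min_length (tryptic_cut sequence allow_miss_clevage min_length)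

-- ===== LEMMAS AND PROOFS =====

-- a character is a cleavage letter
def pvKRc (ch : Char) : Bool := ch == 'K' || ch == 'R'
-- the port's cleavage test at position p of l
def pvKR (l : List Char) (p : Nat) : Bool := pvKRc (l.getD p ' ')
-- internal cleavage boundaries (Python's cut positions i+1 for i in range(len-1))
def pvSites (l : List Char) : List Nat := ((List.range (l.length - 1)).filter (pvKR l)).map (· + 1)
-- full boundary list 0 :: sites ++ [len]
def pvCuts (l : List Char) : List Nat := 0 :: pvSites l ++ [l.length]
-- l[a:b] for naturals
def pvSeg (l : List Char) (a b : Nat) : List Char := (l.drop a).take (b - a)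
-- number of cleavage letters among the first t positions
def pvS (l : List Char) (t : Nat) : Nat := (List.range t).countP (pvKR l)
-- number of boundaries strictly between a and b
def pvBetween (D : List Nat) (a b : Nat) : Nat := D.countP (fun q => decide (a < q) && decide (q < b))
-- the window generator B computes
def pvW (l : List Char) (al : Nat) (mn : Int) : List Nat → List String
  | [] => []
  | x :: xs =>
      ((xs.take (al + 1)).filter (fun (e : Nat) => decide (mn ≤ (e : Int) - (x : Int)))).map
        (fun e => String.ofList (pvSeg l x e)) ++ pvW l al mn xs

lemma pv_count_go_single (c : Char) : ∀ (s : List Char) (fuel acc : Nat), s.length ≤ fuel →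
    PySem.Chars.count.go [c] fuel s acc = acc + s.count c := by
  intro s
  induction s with
  | nil => intro fuel acc h; cases fuel <;> simp [PySem.Chars.count.go]
  | cons h t ih =>
    intro fuel acc hf
    cases fuel with
    | zero => simp at hf
    | succ f =>
      simp only [List.length_cons] at hf
      by_cases hc : c = h
      · subst hc
        simp [PySem.Chars.count.go, List.isPrefixOf, ih f (acc + 1) (by omega),
          List.count_cons] <;> omega
      · have hbe : (c == h) = false := by simp [hc]
        have hbe2 : (h == c) = false := by simp [Ne.symm hc]
        simp [PySem.Chars.count.go, List.isPrefixOf, hbe, hbe2,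
          ih f acc (by omega), List.count_cons]


lemma pv_count_single (s : List Char) (c : Char) : PySem.Chars.count s [c] = s.count c := by
  simp [PySem.Chars.count, pv_count_go_single c s s.length 0 le_rfl]


lemma pv_isIn_KR (c : Char) : PySem.Chars.isIn [c] ['K', 'R'] = pvKRc c := by
  by_cases hK : c = 'K'
  · subst hK; decide
  · by_cases hR : c = 'R'
    · subst hR; decide
    · have hni : ¬ ([c] <:+: ['K', 'R']) := by
        intro hin
        have hc : c ∈ ['K', 'R'] := hin.subset (by simp)
        simp at hc
        rcases hc with hc | hc <;> [exact hK hc; exact hR hc]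
      rw [(PySem.Chars.isIn_eq_false_iff _ _).2 hni]
      simp [pvKRc, hK, hR]


lemma pv_countKR (s : List Char) : s.count 'R' + s.count 'K' = s.countP pvKRc := by
  induction s with
  | nil => simp
  | cons h t ih =>
    by_cases hR : h = 'R' <;> by_cases hK : h = 'K' <;>
      simp [List.count_cons, List.countP_cons, pvKRc, hR, hK] <;> omega


lemma pv_S_succ (l : List Char) (t : Nat) :
    pvS l (t + 1) = pvS l t + (if pvKR l t then 1 else 0) := by
  simp [pvS, List.range_succ, List.countP_append, List.countP_cons]


lemma pv_countKR_take (l : List Char) (t : Nat) (h : t ≤ l.length) :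
    (l.take t).countP pvKRc = pvS l t := by
  induction t with
  | zero => simp [pvS]
  | succ t ih =>
    have ht : t < l.length := by omega
    have hget : l[t]? = some l[t] := List.getElem?_eq_getElem ht
    have hgd : l.getD t ' ' = l[t] := by simp [List.getD, hget]
    rw [List.take_succ, pv_S_succ]
    simp only [hget, List.countP_append, ih (le_of_lt ht)]
    cases hkr : pvKR l t
    · have : pvKRc l[t] = false := by rw [← hgd]; exact hkr
      simp [this]
    · have : pvKRc l[t] = true := by rw [← hgd]; exact hkr
      simp [this]


lemma pv_seg_countP (l : List Char) (a b : Nat) (hab : a ≤ b) (hb : b ≤ l.length) :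
    pvS l a + (pvSeg l a b).countP pvKRc = pvS l b := by
  have hsplit : l.take b = l.take a ++ pvSeg l a b := by
    rw [pvSeg, ← List.take_add, Nat.add_sub_cancel' hab]
  have := congrArg (List.countP pvKRc) hsplit
  rw [List.countP_append, pv_countKR_take l b hb, pv_countKR_take l a (le_trans hab hb)] at this
  omega


lemma pv_seg_length (l : List Char) (a b : Nat) (hab : a ≤ b) (hb : b ≤ l.length) :
    (pvSeg l a b).length = b - a := by
  simp [pvSeg]
  omega


lemma pv_between_cuts (l : List Char) (a b : Nat) (hab : a < b) (hb : b ≤ l.length) :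
    pvS l a + pvBetween (pvCuts l) a b = pvS l (b - 1) := by
  have h1 : pvBetween (pvCuts l) a b = pvBetween (pvSites l) a b := by
    simp only [pvCuts, pvBetween, List.countP_cons, List.countP_append]
    have c0 : (decide (a < 0) && decide ((0 : Nat) < b)) = false := by simp
    have cn : (decide (a < l.length) && decide (l.length < b)) = false := by
      have : ¬ l.length < b := by omega
      simp [this]
    simp [c0, cn]
  have h2 : pvBetween (pvSites l) a b
      = (List.range (l.length - 1)).countP
          (fun p => (decide (a < p + 1) && decide (p + 1 < b)) && pvKR l p) := by
    simp only [pvSites, pvBetween, List.countP_map, List.countP_filter]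
    rfl
  have e1 : (List.range (l.length - 1)).countP
        (fun p => (decide (a < p + 1) && decide (p + 1 < b)) && pvKR l p)
      = (List.range (b - 1)).countP
        (fun p => (decide (a < p + 1) && decide (p + 1 < b)) && pvKR l p) := by
    conv_lhs => rw [show l.length - 1 = (b - 1) + (l.length - b) by omega, List.range_add]
    rw [List.countP_append, List.countP_map]
    have hz : (List.range (l.length - b)).countP
        ((fun p => (decide (a < p + 1) && decide (p + 1 < b)) && pvKR l p) ∘ (fun x => (b - 1) + x)) = 0 := by
      apply List.countP_eq_zero.2
      intro p _
      have : ¬ ((b - 1) + p + 1 < b) := by omega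
      simp [Function.comp, this]
    rw [hz]
    omega
  have e2 : (List.range (b - 1)).countP
        (fun p => (decide (a < p + 1) && decide (p + 1 < b)) && pvKR l p)
      = (List.range (b - 1 - a)).countP (fun x => pvKR l (a + x)) := by
    conv_lhs => rw [show b - 1 = a + (b - 1 - a) by omega, List.range_add]
    rw [List.countP_append, List.countP_map]
    have hz2 : (List.range a).countP
        (fun p => (decide (a < p + 1) && decide (p + 1 < b)) && pvKR l p) = 0 := by
      apply List.countP_eq_zero.2
      intro p hp
      have hpa : p < a := List.mem_range.1 hp
      have : ¬ (a < p + 1) := by omega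
      simp [this]
    rw [hz2]
    have : ∀ x ∈ List.range (b - 1 - a),
        ((fun p => (decide (a < p + 1) && decide (p + 1 < b)) && pvKR l p) ∘ (fun x => a + x)) x
          = (fun x => pvKR l (a + x)) x := by
      intro x hx
      have hxlt : x < b - 1 - a := List.mem_range.1 hx
      have h1' : a < a + x + 1 := by omega
      have h2' : a + x + 1 < b := by omega
      simp [Function.comp, h1', h2']
    rw [List.countP_congr (fun x hx => by rw [this x hx])]
    omega
  have hS : pvS l (b - 1) = pvS l a + (List.range (b - 1 - a)).countP (fun x => pvKR l (a + x)) := by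
    unfold pvS
    conv_lhs => rw [show b - 1 = a + (b - 1 - a) by omega, List.range_add]
    rw [List.countP_append, List.countP_map]
    congr 1
  rw [h1, h2, e1, e2, hS]


lemma pv_seg_getLast (l : List Char) (a b : Nat) (hab : a < b) (hb : b ≤ l.length)
    (h : pvSeg l a b ≠ []) : (pvSeg l a b).getLast h = l.getD (b - 1) ' ' := by
  have hlen : (pvSeg l a b).length = b - a := pv_seg_length l a b (le_of_lt hab) hb
  have hb1 : b - 1 < l.length := by omega
  have hgd : l.getD (b - 1) ' ' = l[b - 1] := by
    simp [List.getD, List.getElem?_eq_getElem hb1]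
  rw [List.getLast_eq_getElem, hgd]
  have hidx : a + ((pvSeg l a b).length - 1) = b - 1 := by
    rw [hlen]; omega
  calc (pvSeg l a b)[(pvSeg l a b).length - 1]'(by omega)
      = l[a + ((pvSeg l a b).length - 1)]'(by rw [hidx]; omega) := by
        simp only [pvSeg, List.getElem_take, List.getElem_drop]
    _ = l[b - 1]'(by omega) := by simp only [hidx]


lemma pv_seg_dropLast (l : List Char) (a b : Nat) (hab : a < b) (hb : b ≤ l.length) :
    (pvSeg l a b).dropLast = pvSeg l a (b - 1) := by
  have hlen : (pvSeg l a b).length = b - a := pv_seg_length l a b (le_of_lt hab) hb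
  rw [List.dropLast_eq_take, hlen]
  show List.take (b - a - 1) ((l.drop a).take (b - a)) = _
  rw [List.take_take]
  simp [pvSeg]
  congr 1
  omega


-- the crux: stripped K/R count inside l[a:b] = number of boundaries strictly between a and b
lemma pv_scount (l : List Char) (a b : Nat) (hab : a < b) (hb : b ≤ l.length) :
    ((if pvKR l (b - 1) then (pvSeg l a b).dropLast else pvSeg l a b).countP pvKRc)
      = pvBetween (pvCuts l) a b := by
  have h1 := pv_seg_countP l a (b - 1) (by omega) (by omega)
  have h2 := pv_seg_countP l a b (le_of_lt hab) hb
  have h3 := pv_between_cuts l a b hab hb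
  have h4 : pvS l b = pvS l (b - 1) + (if pvKR l (b - 1) then 1 else 0) := by
    have h5 := pv_S_succ l (b - 1)
    rw [show b - 1 + 1 = b by omega] at h5
    exact h5
  cases hkr : pvKR l (b - 1)
  · simp only [hkr, Bool.false_eq_true, if_false]
    simp only [hkr, Bool.false_eq_true, if_false, add_zero] at h4
    omega
  · simp only [hkr, if_true]
    rw [pv_seg_dropLast l a b hab hb]
    omega

lemma pv_sites_bounds (l : List Char) (q : Nat) (h : q ∈ pvSites l) : 0 < q ∧ q < l.length := by
  simp only [pvSites, List.mem_map, List.mem_filter, List.mem_range] at h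
  obtain ⟨p, ⟨hp, -⟩, rfl⟩ := h
  omega


lemma pv_cuts_pairwise (l : List Char) (hl : 0 < l.length) : (pvCuts l).Pairwise (· < ·) := by
  have hsites : (pvSites l).Pairwise (· < ·) := by
    have hf : (List.filter (pvKR l) (List.range (l.length - 1))).Pairwise (· < ·) :=
      List.Pairwise.sublist List.filter_sublist List.pairwise_lt_range
    exact List.pairwise_map.2 (hf.imp (fun h => by omega))
  refine List.pairwise_cons.2 ⟨?_, ?_⟩
  · intro y hy
    rcases List.mem_append.1 hy with hy | hy
    · exact (pv_sites_bounds l y hy).1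
    · simp at hy; omega
  · refine List.pairwise_append.2 ⟨hsites, List.pairwise_singleton _ _, ?_⟩
    intro a ha b hb
    simp at hb
    have := (pv_sites_bounds l a ha).2
    omega


lemma pv_cuts_le (l : List Char) (q : Nat) (h : q ∈ pvCuts l) : q ≤ l.length := by
  have h' : q = 0 ∨ q ∈ pvSites l ∨ q = l.length := by
    simpa [pvCuts, or_assoc] using h
  rcases h' with h' | h' | h'
  · omega
  · exact le_of_lt (pv_sites_bounds l q h').2
  · exact le_of_eq h' 


lemma pv_pair_shape {α : Type} (c : List α) (h : c.length = 2) : ∃ a b, c = [a, b] := by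
  match c, h with
  | [a, b], _ => exact ⟨a, b, rfl⟩

-- the head row of the pair table, filtered by the between-count, is B's window row
lemma pv_row (l : List Char) (mn : Int) : ∀ (xs : List Nat) (x : Nat) (al : Int), 0 ≤ al →
    xs.Pairwise (· < ·) → (∀ y ∈ xs, x < y) →
    ((xs.map (fun y => [x, y])).filter (fun c =>
        decide ((pvBetween (x :: xs) (c.getD 0 0) (c.getD 1 0) : Int) ≤ al) &&
        decide (mn ≤ (c.getD 1 0 : Int) - (c.getD 0 0 : Int)))).map
      (fun c => String.ofList (pvSeg l (c.getD 0 0) (c.getD 1 0)))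
    = ((xs.take (al.toNat + 1)).filter (fun (e : Nat) => decide (mn ≤ (e : Int) - (x : Int)))).map
        (fun e => String.ofList (pvSeg l x e)) := by

  intro xs
  induction xs with
  | nil => intro x al hal _ _; simp
  | cons y ys ih =>
    intro x al hal hpw hlt
    have hxy : x < y := hlt y (by simp)
    obtain ⟨hyys, hpw'⟩ := List.pairwise_cons.1 hpw
    have h0 : pvBetween (x :: y :: ys) x y = 0 := by
      apply List.countP_eq_zero.2
      intro q hq
      simp only [Bool.and_eq_true, decide_eq_true_eq, not_and]
      rcases List.mem_cons.1 hq with rfl | hq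
      · omega
      rcases List.mem_cons.1 hq with rfl | hq
      · omega
      · have := hyys q hq
        omega
    have hconv : ∀ c ∈ ys.map (fun b => [x, b]),
        (decide ((pvBetween (x :: y :: ys) (c.getD 0 0) (c.getD 1 0) : Int) ≤ al) &&
          decide (mn ≤ (c.getD 1 0 : Int) - (c.getD 0 0 : Int)))
        = (decide ((pvBetween (x :: ys) (c.getD 0 0) (c.getD 1 0) : Int) ≤ al - 1) &&
          decide (mn ≤ (c.getD 1 0 : Int) - (c.getD 0 0 : Int))) := by
      intro c hc
      obtain ⟨b', hb', rfl⟩ := List.mem_map.1 hc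
      have hyb : y < b' := hyys b' hb'
      have hplus : pvBetween (x :: y :: ys) x b' = 1 + pvBetween (x :: ys) x b' := by
        simp only [pvBetween, List.countP_cons]
        have hy : (decide (x < y) && decide (y < b')) = true := by simp [hxy, hyb]
        have hxx : (decide (x < x) && decide (x < b')) = false := by simp
        simp [hy, hxx] <;> omega
      simp only [List.getD_cons_zero, List.getD_cons_succ]
      rw [hplus]
      congr 1
      rw [decide_eq_decide]
      push_cast
      omega
    simp only [List.map_cons, List.filter_cons, List.getD_cons_zero, List.getD_cons_succ]
    rw [h0]
    have hz : (decide (((0 : Nat) : Int) ≤ al)) = true := by simp [hal]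
    rw [hz]
    simp only [Bool.true_and]
    rw [List.filter_congr hconv]
    by_cases hal1 : 1 ≤ al
    · have hihr := ih x (al - 1) (by omega) hpw' (fun z hz' => hlt z (by simp [hz']))
      have htk : al.toNat + 1 = ((al - 1).toNat + 1) + 1 := by omega
      rw [htk, List.take_succ_cons, List.filter_cons]
      by_cases hmn : mn ≤ (y : Int) - (x : Int)
      · have hd : decide (mn ≤ (y : Int) - (x : Int)) = true := decide_eq_true hmn
        simp only [hd, if_true, List.map_cons, List.getD_cons_zero, List.getD_cons_succ]
        rw [hihr]
      · have hd : decide (mn ≤ (y : Int) - (x : Int)) = false := decide_eq_false hmn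
        simp only [hd, Bool.false_eq_true, if_false]
        rw [hihr]
    · have hal0 : al = 0 := by omega
      subst hal0
      have hfn : List.filter
          (fun c => decide ((pvBetween (x :: ys) (c.getD 0 0) (c.getD 1 0) : Int) ≤ 0 - 1) &&
            decide (mn ≤ (c.getD 1 0 : Int) - (c.getD 0 0 : Int)))
          (ys.map (fun b => [x, b])) = [] := by
        apply List.filter_eq_nil_iff.2
        intro c hc
        obtain ⟨b', _, rfl⟩ := List.mem_map.1 hc
        simp only [List.getD_cons_zero, List.getD_cons_succ]
        have hneg : ¬ ((pvBetween (x :: ys) x b' : Int) ≤ 0 - 1) := by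
          have : (0 : Int) ≤ (pvBetween (x :: ys) x b' : Int) := Int.natCast_nonneg _
          omega
        simp only [Bool.and_eq_true, decide_eq_true_eq, not_and]
        intro h
        omega
      rw [hfn]
      by_cases hmn : mn ≤ (y : Int) - (x : Int)
      · have hd : decide (mn ≤ (y : Int) - (x : Int)) = true := decide_eq_true hmn
        simp [hd, List.take_succ_cons, List.filter_cons]
      · have hd : decide (mn ≤ (y : Int) - (x : Int)) = false := decide_eq_false hmn
        simp [hd, List.take_succ_cons, List.filter_cons]

-- pair table + between-count filter = window generator, on any strictly increasing list
lemma pv_main (l : List Char) (mn : Int) : ∀ (D : List Nat) (al : Int), 0 ≤ al →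
    D.Pairwise (· < ·) →
    ((PySem.List.combinations D 2).filter (fun c =>
        decide ((pvBetween D (c.getD 0 0) (c.getD 1 0) : Int) ≤ al) &&
        decide (mn ≤ (c.getD 1 0 : Int) - (c.getD 0 0 : Int)))).map
      (fun c => String.ofList (pvSeg l (c.getD 0 0) (c.getD 1 0)))
    = pvW l al.toNat mn D := by
  intro D
  induction D with
  | nil =>
    intro al hal hpw
    simp [PySem.List.combinations_nil_succ, pvW]
  | cons x xs ih =>
    intro al hal hpw
    obtain ⟨hlt, hpw'⟩ := List.pairwise_cons.1 hpw
    rw [PySem.List.combinations_cons_succ, PySem.List.combinations_one, List.map_map,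
        List.filter_append, List.map_append]
    have hcomp : ((fun c => x :: c) ∘ (fun (y : Nat) => [y])) = (fun y => [x, y]) := rfl
    rw [hcomp]
    have hconv : ∀ c ∈ PySem.List.combinations xs 2,
        (decide ((pvBetween (x :: xs) (c.getD 0 0) (c.getD 1 0) : Int) ≤ al) &&
          decide (mn ≤ (c.getD 1 0 : Int) - (c.getD 0 0 : Int)))
        = (decide ((pvBetween xs (c.getD 0 0) (c.getD 1 0) : Int) ≤ al) &&
          decide (mn ≤ (c.getD 1 0 : Int) - (c.getD 0 0 : Int))) := by
      intro c hc
      obtain ⟨hsub, hlen2⟩ := (PySem.List.mem_combinations_iff xs 2 c).1 hc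
      obtain ⟨a, b, rfl⟩ := pv_pair_shape c hlen2
      have hpab : ([a, b] : List Nat).Pairwise (· < ·) := List.Pairwise.sublist hsub hpw'
      have hab : a < b := by
        have := List.pairwise_cons.1 hpab
        exact this.1 b (by simp)
      have hax : x < a := hlt a (hsub.subset (by simp))
      have heq : pvBetween (x :: xs) a b = pvBetween xs a b := by
        simp only [pvBetween, List.countP_cons]
        have hna : ¬ a < x := by omega
        simp [hna]
      simp only [List.getD_cons_zero, List.getD_cons_succ]
      rw [heq]
    rw [List.filter_congr hconv, ih al hal hpw']
    have hrow := pv_row l mn xs x al hal hpw' hlt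
    rw [hrow]
    rfl


lemma pv_range_eq (n : Nat) :
    PySem.List.pyRange 0 ((n : Int) - 1) 1 = (List.range (n - 1)).map (Nat.cast : Nat → Int) := by
  cases n with
  | zero => decide
  | succ m =>
    have : ((m + 1 : Nat) : Int) - 1 = (m : Int) := by push_cast; ring
    rw [this, PySem.List.pyRange_zero_natCast]
    simp


-- B's fold over the enumerated boundary list is the window generator
lemma pv_foldB (l : List Char) (al mn : Int) (hal : 0 ≤ al) :
    ∀ (suffix : List Nat) (full : List Nat) (s : Nat), full.drop s = suffix →
    ∀ (init : List String),
    (PySem.List.enumerate (suffix.map (Nat.cast : Nat → Int)) (s : Int)).foldl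
      (fun acc p =>
        (PySem.List.slice (full.map (Nat.cast : Nat → Int)) (some (p.1 + 1))
            (some (p.1 + 2 + al))).foldl
          (fun acc2 e =>
            if mn ≤ e - p.2
            then acc2 ++ [String.ofList (PySem.List.slice l (some p.2) (some e))]
            else acc2) acc) init
    = init ++ pvW l al.toNat mn suffix := by
  intro suffix
  induction suffix with
  | nil =>
    intro full s h init
    simp [PySem.List.enumerate, pvW]
  | cons x xs ih =>
    intro full s h init
    have hdrop : full.drop (s + 1) = xs := by
      have h1 := congrArg (List.drop 1) h
      rw [List.drop_drop] at h1
      simpa using h1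
    rw [List.map_cons]
    rw [show PySem.List.enumerate ((↑x : Int) :: xs.map (Nat.cast : Nat → Int)) (↑s : Int)
        = ((↑s : Int), (↑x : Int)) :: PySem.List.enumerate (xs.map (Nat.cast : Nat → Int)) ((↑s : Int) + 1) from rfl]
    simp only [List.foldl_cons]
    have h1 : (0 : Int) ≤ (s : Int) + 1 := by omega
    have h2 : (0 : Int) ≤ (s : Int) + 2 + al := by omega
    have hacc : (PySem.List.slice (full.map (Nat.cast : Nat → Int)) (some ((s : Int) + 1))
          (some ((s : Int) + 2 + al))).foldl
        (fun acc2 e => if mn ≤ e - (↑x : Int)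
          then acc2 ++ [String.ofList (PySem.List.slice l (some (↑x : Int)) (some e))]
          else acc2) init
        = init ++ ((xs.take (al.toNat + 1)).filter
            (fun (e : Nat) => decide (mn ≤ (e : Int) - (x : Int)))).map
            (fun e => String.ofList (pvSeg l x e)) := by
      rw [PySem.List.slice_toNat _ h1 h2]
      have e1 : ((s : Int) + 1).toNat = s + 1 := by omega
      have e2 : ((s : Int) + 2 + al).toNat - (s + 1) = al.toNat + 1 := by omega
      rw [e1, e2, ← List.map_drop, hdrop, ← List.map_take, List.foldl_map]
      have hbody : (fun (acc2 : List String) (e : Nat) =>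
            if mn ≤ (↑e : Int) - (↑x : Int)
            then acc2 ++ [String.ofList (PySem.List.slice l (some (↑x : Int)) (some (↑e : Int)))]
            else acc2)
          = (fun acc2 e =>
            if (fun (e : Nat) => decide (mn ≤ (e : Int) - (x : Int))) e = true
            then acc2 ++ [(fun (e : Nat) => String.ofList (pvSeg l x e)) e] else acc2) := by
        funext acc2 e
        rw [PySem.List.slice_natCast]
        by_cases hd : mn ≤ (e : Int) - (x : Int) <;> simp [hd, pvSeg]
      rw [hbody, PySem.List.foldl_append_if]
    rw [hacc]
    have hcast : (s : Int) + 1 = ((s + 1 : Nat) : Int) := by push_cast; ring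
    rw [hcast, ih full (s + 1) hdrop _, List.append_assoc]
    rfl


-- B's port computes the window generator over the boundary list
lemma pv_B_eq_W (s : String) (al mn : Int) (hal : 0 ≤ al) :
    tryptic_cut_alt s al mn
      = pvW (PySem.Chars.upper (pvRstripStar s.toList)) al.toNat mn
          (pvCuts (PySem.Chars.upper (pvRstripStar s.toList))) := by
  simp only [tryptic_cut_alt]
  set l := PySem.Chars.upper (pvRstripStar s.toList) with hldef
  have hcuts : (0 : Int) :: ((PySem.List.pyRange 0 ((l.length : Int) - 1) 1).filter
        (fun i => PySem.Chars.isIn [PySem.List.pyGetD l i ' '] ['K', 'R'])).map (· + 1)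
        ++ [(l.length : Int)]
      = (pvCuts l).map (Nat.cast : Nat → Int) := by
    rw [pv_range_eq, List.filter_map]
    have hp : ∀ p ∈ (List.range (l.length - 1)),
        ((fun i => PySem.Chars.isIn [PySem.List.pyGetD l i ' '] ['K', 'R'])
          ∘ (Nat.cast : Nat → Int)) p = pvKR l p := by
      intro p _
      show PySem.Chars.isIn [PySem.List.pyGetD l (p : Int) ' '] ['K', 'R'] = pvKR l p
      rw [PySem.List.pyGetD_natCast, pv_isIn_KR]
      rfl
    rw [List.filter_congr hp, List.map_map]
    have hg : ((fun (i : Int) => i + 1) ∘ (Nat.cast : Nat → Int))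
        = (Nat.cast : Nat → Int) ∘ (fun (p : Nat) => p + 1) := by
      funext p
      simp
    rw [hg, ← List.map_map]
    simp [pvCuts, pvSites]
  rw [hcuts]
  have h0 : ((0 : Nat) : Int) = (0 : Int) := rfl
  have := pv_foldB l al mn hal (pvCuts l) (pvCuts l) 0 (by simp) []
  rw [h0] at this
  rw [this]
  simp


-- A's filtering fold, as filter-then-map
lemma pv_foldA (al mn : Int) (L : List (List Char)) (init : List String) :
    L.foldl (fun acc line =>
      if ((PySem.Chars.count (if (PySem.List.pyGetD line (-1) ' ' == 'K' || PySem.List.pyGetD line (-1) ' ' == 'R')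
              then PySem.List.slice line none (some (-1)) else line) ['R'] : Int)
          + (PySem.Chars.count (if (PySem.List.pyGetD line (-1) ' ' == 'K' || PySem.List.pyGetD line (-1) ' ' == 'R')
              then PySem.List.slice line none (some (-1)) else line) ['K'] : Int)) ≤ al
      then if mn ≤ (line.length : Int) then acc ++ [String.ofList line] else acc
      else acc) init
    = init ++ (L.filter (fun line =>
        decide (((PySem.Chars.count (if (PySem.List.pyGetD line (-1) ' ' == 'K' || PySem.List.pyGetD line (-1) ' ' == 'R')
              then PySem.List.slice line none (some (-1)) else line) ['R'] : Int)
          + (PySem.Chars.count (if (PySem.List.pyGetD line (-1) ' ' == 'K' || PySem.List.pyGetD line (-1) ' ' == 'R')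
              then PySem.List.slice line none (some (-1)) else line) ['K'] : Int)) ≤ al)
        && decide (mn ≤ (line.length : Int)))).map String.ofList := by
  have hbody : (fun (acc : List String) line =>
      if ((PySem.Chars.count (if (PySem.List.pyGetD line (-1) ' ' == 'K' || PySem.List.pyGetD line (-1) ' ' == 'R')
              then PySem.List.slice line none (some (-1)) else line) ['R'] : Int)
          + (PySem.Chars.count (if (PySem.List.pyGetD line (-1) ' ' == 'K' || PySem.List.pyGetD line (-1) ' ' == 'R')
              then PySem.List.slice line none (some (-1)) else line) ['K'] : Int)) ≤ al
      then if mn ≤ (line.length : Int) then acc ++ [String.ofList line] else acc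
      else acc)
      = (fun acc line =>
        if (fun line =>
          decide (((PySem.Chars.count (if (PySem.List.pyGetD line (-1) ' ' == 'K' || PySem.List.pyGetD line (-1) ' ' == 'R')
                then PySem.List.slice line none (some (-1)) else line) ['R'] : Int)
            + (PySem.Chars.count (if (PySem.List.pyGetD line (-1) ' ' == 'K' || PySem.List.pyGetD line (-1) ' ' == 'R')
                then PySem.List.slice line none (some (-1)) else line) ['K'] : Int)) ≤ al)
          && decide (mn ≤ (line.length : Int))) line = true
        then acc ++ [(fun (line : List Char) => String.ofList line) line] else acc) := by
    funext acc line
    by_cases h1 : ((PySem.Chars.count (if (PySem.List.pyGetD line (-1) ' ' == 'K' || PySem.List.pyGetD line (-1) ' ' == 'R')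
              then PySem.List.slice line none (some (-1)) else line) ['R'] : Int)
          + (PySem.Chars.count (if (PySem.List.pyGetD line (-1) ' ' == 'K' || PySem.List.pyGetD line (-1) ' ' == 'R')
              then PySem.List.slice line none (some (-1)) else line) ['K'] : Int)) ≤ al <;>
      by_cases h2 : mn ≤ (line.length : Int) <;> simp [h1, h2]
  rw [hbody, PySem.List.foldl_append_if]

-- pointwise congruence for filter-then-map
lemma pv_filter_map_congr {α γ : Type} (L : List α) (p q : α → Bool) (f g : α → γ)
    (hp : ∀ c ∈ L, p c = q c) (hf : ∀ c ∈ L, f c = g c) :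
    (L.filter p).map f = (L.filter q).map g := by
  rw [List.filter_congr hp]
  exact List.map_congr_left (fun c hc => hf c (List.mem_of_mem_filter hc))

-- the window generator on a two-element boundary list
lemma pv_W_two (l : List Char) (A : Nat) (mn : Int) :
    pvW l A mn [0, l.length] = if mn ≤ (l.length : Int) then [String.ofList l] else [] := by
  have hseg : pvSeg l 0 l.length = l := by simp [pvSeg]
  by_cases hmn : mn ≤ (l.length : Int) <;> simp [pvW, List.take_succ_cons, hseg, hmn]

-- the slice a 2-combination produces
lemma pv_gc (l : List Char) (a b : Nat) :
    PySem.List.slice l (some (PySem.List.pyGetD ([a, b].map (Nat.cast : Nat → Int)) 0 0))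
      (some (PySem.List.pyGetD ([a, b].map (Nat.cast : Nat → Int)) 1 0)) = pvSeg l a b := by
  simp only [List.map_cons, List.map_nil]
  rw [show PySem.List.pyGetD [(↑a : Int), (↑b : Int)] 0 0 = (↑a : Int) from rfl,
      show PySem.List.pyGetD [(↑a : Int), (↑b : Int)] 1 0 = (↑b : Int) from rfl,
      PySem.List.slice_natCast]
  rfl

-- A's port computes the same
lemma pv_A_eq_W (s : String) (al mn : Int) (hal : 0 ≤ al) :
    tryptic_cut s al mn
      = pvW (PySem.Chars.upper (pvRstripStar s.toList)) al.toNat mn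
          (pvCuts (PySem.Chars.upper (pvRstripStar s.toList))) := by
  simp only [tryptic_cut]
  set l := PySem.Chars.upper (pvRstripStar s.toList) with hldef
  have hsite1 : (PySem.List.pyRange 0 ((l.length : Int) - 1) 1).foldl
      (fun acc i => if (PySem.List.pyGetD l i ' ' == 'K' || PySem.List.pyGetD l i ' ' == 'R')
        then acc ++ [i + 1] else acc) [0]
      = (0 : Int) :: (pvSites l).map (Nat.cast : Nat → Int) := by
    rw [PySem.List.foldl_append_if
      (fun i => PySem.List.pyGetD l i ' ' == 'K' || PySem.List.pyGetD l i ' ' == 'R')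
      (fun i => i + 1), pv_range_eq, List.filter_map]
    have hp : ∀ p ∈ List.range (l.length - 1),
        ((fun (i : Int) => PySem.List.pyGetD l i ' ' == 'K' || PySem.List.pyGetD l i ' ' == 'R')
          ∘ (Nat.cast : Nat → Int)) p = pvKR l p := by
      intro p _
      show (PySem.List.pyGetD l (p : Int) ' ' == 'K' || PySem.List.pyGetD l (p : Int) ' ' == 'R') = pvKR l p
      rw [PySem.List.pyGetD_natCast]
      rfl
    rw [List.filter_congr hp, List.map_map]
    have hg : ((fun (i : Int) => i + 1) ∘ (Nat.cast : Nat → Int))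
        = (Nat.cast : Nat → Int) ∘ (fun (p : Nat) => p + 1) := by
      funext p
      simp
    rw [hg, ← List.map_map]
    rfl
  rw [hsite1]
  by_cases hn0 : l.length = 0
  · have hs0 : pvSites l = [] := by simp [pvSites, hn0]
    rw [hs0]
    simp only [List.map_nil]
    have hc1 : ¬ (PySem.List.pyGetD [(0 : Int)] (-1) 0 ≠ (l.length : Int)) := by
      simp [hn0, show PySem.List.pyGetD [(0 : Int)] (-1) 0 = 0 from rfl]
    rw [if_neg hc1]
    rw [if_neg (show ¬ (([(0 : Int)]).length > 2) by simp)]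
    rw [show pvCuts l = [0, l.length] by simp [pvCuts, hs0], pv_W_two]
  · have hnpos : 0 < l.length := Nat.pos_of_ne_zero hn0
    have hne1 : ((0 : Int) :: (pvSites l).map (Nat.cast : Nat → Int)) ≠ [] := by simp
    have hlast : PySem.List.pyGetD ((0 : Int) :: (pvSites l).map (Nat.cast : Nat → Int)) (-1) 0
        ≠ (l.length : Int) := by
      rw [PySem.List.pyGetD_neg_one _ _ hne1]
      have hmem := List.getLast_mem hne1
      rcases List.mem_cons.1 hmem with hg | hg
      · rw [hg]
        intro hc
        omega
      · obtain ⟨q, hq, hqe⟩ := List.mem_map.1 hg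
        rw [← hqe]
        have hlt := (pv_sites_bounds l q hq).2
        intro hc
        have : q = l.length := by exact_mod_cast hc
        omega
    rw [if_pos hlast]
    have hclo : (((0 : Int) :: (pvSites l).map (Nat.cast : Nat → Int)) ++ [(l.length : Int)])
        = (pvCuts l).map (Nat.cast : Nat → Int) := by
      simp [pvCuts]
    rw [hclo]
    by_cases hs0 : pvSites l = []
    · rw [if_neg (by simp [pvCuts, hs0])]
      rw [show pvCuts l = [0, l.length] by simp [pvCuts, hs0], pv_W_two]
    · have hlp : 0 < (pvSites l).length := List.length_pos_of_ne_nil hs0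
      rw [if_pos (by simp [pvCuts]; omega)]
      rw [PySem.List.foldl_append_singleton_eq_map, List.nil_append, pv_foldA,
        List.nil_append, PySem.List.combinations_map, List.map_map, List.filter_map,
        List.map_map]
      have hpw := pv_cuts_pairwise l hnpos
      refine Eq.trans (pv_filter_map_congr _ _ _ _ _ ?_ ?_)
        (pv_main l mn (pvCuts l) al hal hpw)
      · intro c hc
        obtain ⟨hsub, hlen2⟩ := (PySem.List.mem_combinations_iff _ 2 c).1 hc
        obtain ⟨a, b, rfl⟩ := pv_pair_shape c hlen2
        have hpab : ([a, b] : List Nat).Pairwise (· < ·) := List.Pairwise.sublist hsub hpw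
        have hab : a < b := (List.pairwise_cons.1 hpab).1 b (by simp)
        have hble : b ≤ l.length := pv_cuts_le l b (hsub.subset (by simp))
        have hne : pvSeg l a b ≠ [] := by
          have hlen := pv_seg_length l a b (le_of_lt hab) hble
          intro h0
          rw [h0] at hlen
          simp at hlen
          omega
        simp only [Function.comp_apply, pv_gc]
        simp only [PySem.List.pyGetD_neg_one _ _ hne, pv_seg_getLast l a b hab hble hne,
          show (l.getD (b - 1) ' ' == 'K' || l.getD (b - 1) ' ' == 'R') = pvKR l (b - 1) from rfl,
          PySem.List.slice_to_neg_one, pv_count_single]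
        have hnat : (if pvKR l (b - 1) then (pvSeg l a b).dropLast else pvSeg l a b).count 'R'
            + (if pvKR l (b - 1) then (pvSeg l a b).dropLast else pvSeg l a b).count 'K'
            = pvBetween (pvCuts l) a b := by
          rw [pv_countKR]
          exact pv_scount l a b hab hble
        have hint : ((if pvKR l (b - 1) then (pvSeg l a b).dropLast else pvSeg l a b).count 'R' : Int)
            + ((if pvKR l (b - 1) then (pvSeg l a b).dropLast else pvSeg l a b).count 'K' : Int)
            = (pvBetween (pvCuts l) a b : Int) := by
          exact_mod_cast hnat
        simp only [hint, pv_seg_length l a b (le_of_lt hab) hble]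
        have hbc : ((b - a : Nat) : Int) = (b : Int) - (a : Int) := by omega
        simp only [hbc, List.getD_cons_zero, List.getD_cons_succ]
      · intro c hc
        obtain ⟨hsub, hlen2⟩ := (PySem.List.mem_combinations_iff _ 2 c).1 hc
        obtain ⟨a, b, rfl⟩ := pv_pair_shape c hlen2
        simp only [Function.comp_apply, pv_gc, List.getD_cons_zero, List.getD_cons_succ]

-- ===== VERDICT (by name: the statement is the Claim_ definition above) =====
theorem tryptic_cut_spec : Claim_equal_tryptic_cut := by
  intro s al mn _ hpre
  unfold Spec_tryptic_cut
  rw [pv_A_eq_W s al mn hpre, pv_B_eq_W s al mn hpre]
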